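-- pv_equiv track=rewrite | github.com/PytorchConnectomics/pytorch_connectomics | connectomics/data/process/affinity.py | compute_affinity_crop_pad
-- ===== SOURCE A (Python) =====
-- from typing import Any, List, Optional, Sequence
--
-- def compute_affinity_crop_pad(
--     offsets: Sequence[tuple[int, int, int]],
-- ) -> tuple[tuple[int, int], ...]:
--     """Return asymmetric valid-region crop pads for the given offsets."""
--     if not offsets:
--         return tuple()
--
--     ndim = len(offsets[0])
--     leading = [0] * ndim
--     trailing = [0] * ndim
--     for offset in offsets:
--         if len(offset) != ndim:
--             raise ValueError(f"Mixed affinity offset dimensions are not supported: {offsets!r}")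
--         for axis, value in enumerate(offset):
--             leading[axis] = max(leading[axis], max(int(value), 0))
--             trailing[axis] = max(trailing[axis], max(-int(value), 0))
--     return tuple((leading[axis], trailing[axis]) for axis in range(ndim))
-- ===== SOURCE B (Python) =====
-- from typing import Sequence
--
--
-- def compute_affinity_crop_pad(
--     offsets: Sequence[tuple[int, int, int]],
-- ) -> tuple[tuple[int, int], ...]:
--     """Return asymmetric valid-region crop pads for the given offsets."""
--     offsets = list(offsets)
--     if not offsets:
--         return tuple()
--     ndim = len(offsets[0])
--     if any(len(offset) != ndim for offset in offsets):
--         raise ValueError(f"Mixed affinity offset dimensions are not supported: {offsets!r}")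
--     pads = []
--     for column in zip(*offsets):
--         values = [int(v) for v in column]
--         pads.append((max(0, max(values)), max(0, -min(values))))
--     return tuple(pads)
-- ===== Notes on version B (the rewrite author's own statement) =====
-- stated objective: alternative
-- what changed: Replaces A's offset-major sweep maintaining running leading/trailing accumulators with an axis-major decomposition: transpose the offsets with zip(*offsets) and reduce each column with max/min once per axis.
import Mathlib
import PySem

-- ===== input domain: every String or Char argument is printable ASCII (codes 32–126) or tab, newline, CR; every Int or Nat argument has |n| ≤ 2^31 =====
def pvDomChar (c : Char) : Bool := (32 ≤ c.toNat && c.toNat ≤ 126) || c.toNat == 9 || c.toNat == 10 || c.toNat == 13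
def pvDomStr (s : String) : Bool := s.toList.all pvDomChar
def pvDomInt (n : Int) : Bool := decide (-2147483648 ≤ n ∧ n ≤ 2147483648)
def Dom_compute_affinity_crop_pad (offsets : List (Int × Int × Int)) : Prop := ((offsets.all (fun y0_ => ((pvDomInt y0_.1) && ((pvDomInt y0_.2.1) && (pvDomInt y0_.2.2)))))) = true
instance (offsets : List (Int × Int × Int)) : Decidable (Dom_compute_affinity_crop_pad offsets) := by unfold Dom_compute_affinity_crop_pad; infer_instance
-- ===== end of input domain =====

-- B replaces A's offset-major accumulator sweep with an axis-major transpose-then-reduce (alternative decomposition, same cost).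
-- ===== PORT A =====
-- one inner-loop step of A: update (leading, trailing) triples with one offset
def aStep (s : (Int × Int × Int) × (Int × Int × Int)) (o : Int × Int × Int) :
    (Int × Int × Int) × (Int × Int × Int) :=
  ((max s.1.1 (max o.1 0), max s.1.2.1 (max o.2.1 0), max s.1.2.2 (max o.2.2 0)),
   (max s.2.1 (max (-o.1) 0), max s.2.2.1 (max (-o.2.1) 0), max s.2.2.2 (max (-o.2.2) 0)))

def compute_affinity_crop_pad (offsets : List (Int × Int × Int)) : List (Int × Int) :=
  match offsets with
  | [] => []
  | _ =>
    -- ndim is always 3 under the type convention, so the ValueError branch never fires;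
    -- the enumerate loop over the 3 axes is unrolled into the triple update aStep
    let st := offsets.foldl aStep ((0, 0, 0), (0, 0, 0))
    [(st.1.1, st.2.1), (st.1.2.1, st.2.2.1), (st.1.2.2, st.2.2.2)]

-- ===== PORT B =====
-- pad for one transposed column (x :: c): (max(0, max values), max(0, -min values))
def colPad (x : Int) (c : List Int) : Int × Int :=
  (max 0 (c.foldl (fun a v => max a v) x), max 0 (-(c.foldl (fun a v => min a v) x)))

def compute_affinity_crop_pad_alt (offsets : List (Int × Int × Int)) : List (Int × Int) :=
  match offsets with
  | [] => []
  | o :: rest =>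
    [colPad o.1 (rest.map (fun p => p.1)),
     colPad o.2.1 (rest.map (fun p => p.2.1)),
     colPad o.2.2 (rest.map (fun p => p.2.2))]

-- ===== PRECONDITION & SPEC =====
def Spec_compute_affinity_crop_pad (offsets : List (Int × Int × Int)) (out : List (Int × Int)) : Prop := out = compute_affinity_crop_pad_alt offsets
instance (offsets : List (Int × Int × Int)) (out : List (Int × Int)) : Decidable (Spec_compute_affinity_crop_pad offsets out) := by unfold Spec_compute_affinity_crop_pad; infer_instance

-- ===== CLAIM (what is proved, stated in full; the proofs are below) =====
def Claim_equal_compute_affinity_crop_pad : Prop := ∀ (offsets : List (Int × Int × Int)), Dom_compute_affinity_crop_pad offsets → Spec_compute_affinity_crop_pad offsets (compute_affinity_crop_pad offsets)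

-- ===== LEMMAS AND PROOFS =====

-- A's fold over triples projects to independent per-axis scalar folds
theorem foldl_aStep_proj (xs : List (Int × Int × Int)) (s : (Int × Int × Int) × (Int × Int × Int)) :
    xs.foldl aStep s =
      ((List.foldl (fun a v => max a (max v 0)) s.1.1 (xs.map (fun p => p.1)),
        List.foldl (fun a v => max a (max v 0)) s.1.2.1 (xs.map (fun p => p.2.1)),
        List.foldl (fun a v => max a (max v 0)) s.1.2.2 (xs.map (fun p => p.2.2))),
       (List.foldl (fun a v => max a (max (-v) 0)) s.2.1 (xs.map (fun p => p.1)),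
        List.foldl (fun a v => max a (max (-v) 0)) s.2.2.1 (xs.map (fun p => p.2.1)),
        List.foldl (fun a v => max a (max (-v) 0)) s.2.2.2 (xs.map (fun p => p.2.2)))) := by
  induction xs generalizing s with
  | nil => rfl
  | cons o xs ih => simp [List.foldl, ih, aStep]

-- A's leading accumulator equals B's clamped column maximum
theorem lead_fold (rest : List Int) (x : Int) :
    List.foldl (fun a v => max a (max v 0)) (max x 0) rest
      = max 0 (List.foldl (fun a v => max a v) x rest) := by
  induction rest generalizing x with
  | nil => simp only [List.foldl]; omega
  | cons y rest ih =>
    simp only [List.foldl]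
    rw [show max (max x 0) (max y 0) = max (max x y) 0 by omega, ih]

-- A's trailing accumulator equals B's clamped negated column minimum
theorem trail_fold (rest : List Int) (x : Int) :
    List.foldl (fun a v => max a (max (-v) 0)) (max (-x) 0) rest
      = max 0 (-(List.foldl (fun a v => min a v) x rest)) := by
  induction rest generalizing x with
  | nil => simp only [List.foldl]; omega
  | cons y rest ih =>
    simp only [List.foldl]
    rw [show max (max (-x) 0) (max (-y) 0) = max (-(min x y)) 0 by omega, ih]

-- ===== VERDICT (by name: the statement is the Claim_ definition above) =====
theorem compute_affinity_crop_pad_spec : Claim_equal_compute_affinity_crop_pad := by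
  intro offsets _
  unfold Spec_compute_affinity_crop_pad
  cases offsets with
  | nil => rfl
  | cons o rest =>
    simp only [compute_affinity_crop_pad, compute_affinity_crop_pad_alt, List.foldl,
      foldl_aStep_proj, aStep, colPad]
    rw [show max (0:Int) (max o.1 0) = max o.1 0 by omega,
        show max (0:Int) (max o.2.1 0) = max o.2.1 0 by omega,
        show max (0:Int) (max o.2.2 0) = max o.2.2 0 by omega,
        show max (0:Int) (max (-o.1) 0) = max (-o.1) 0 by omega,
        show max (0:Int) (max (-o.2.1) 0) = max (-o.2.1) 0 by omega,
        show max (0:Int) (max (-o.2.2) 0) = max (-o.2.2) 0 by omega,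
        lead_fold, lead_fold, lead_fold, trail_fold, trail_fold, trail_fold]
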